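-- pv_equiv track=rewrite | github.com/mbrown1413/Mixup-Cube-Solver | mixupcube.py | _rotate_turn
-- ===== SOURCE A (Python) =====
-- def _rotate_turn(axis_turn, turn):
--     """
--     Takes a turn string and a cube rotation and returns a new turn that is
--     equivilent but without the axis rotation.
--
--     Ex: _rotate_turn("y", "R") -> "B"
--         The move "y R y'" is equivilent to just "B"
--     """
--     assert len(axis_turn) <= 2
--     axis = axis_turn[0]
--     axis_n = 1 if len(axis_turn) == 1 else 3 if axis_turn[1] == "'" else int(axis_turn[1])
--
--     # Assign
--     #   t = face or slice being turned
--     #   n = number of clockwise turns of `t`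
--     t = turn[0]
--     if len(turn) == 1:
--         n = 1
--     elif turn[1] == "'" and turn[0] in "MSE":
--         n = 7
--     elif turn[1] == "'":
--         n = 3
--     else:
--         n = int(turn[1])
--
--     if axis == "x":
--         for i in range(axis_n):
--             if   t == "U": t,n = "F", n
--             elif t == "F": t,n = "D", n
--             elif t == "D": t,n = "B", n
--             elif t == "B": t,n = "U", n
--             elif t == "S": t,n = "E", n
--             elif t == "E": t,n = "S", 8 - n
--             elif t == "y": t,n = "z", n
--             elif t == "z": t,n = "y", 4 - n
--             else: break
--
--     elif axis == "y":
--         for i in range(axis_n):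
--             if   t == "F": t,n = "R", n
--             elif t == "R": t,n = "B", n
--             elif t == "B": t,n = "L", n
--             elif t == "L": t,n = "F", n
--             elif t == "M": t,n = "S", n
--             elif t == "S": t,n = "M", 8 - n
--             elif t == "x": t,n = "z", 4 - n
--             elif t == "z": t,n = "x", n
--             else: break
--
--     elif axis == "z":
--         for i in range(axis_n):
--             if   t == "U": t,n = "L", n
--             elif t == "L": t,n = "D", n
--             elif t == "D": t,n = "R", n
--             elif t == "R": t,n = "U", n
--             elif t == "M": t,n = "E", n
--             elif t == "E": t,n = "M", 8 - n
--             elif t == "x": t,n = "y", n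
--             elif t == "y": t,n = "x", 4 - n
--             else: break
--
--     else:
--         assert False
--
--     # Convert (t, n) to turn string
--     assert n != 0
--     if n == 1:
--         n_str = ""
--     elif t in "ESM" and n == 7:
--         n_str = "'"
--     elif t not in "ESM" and n == 3:
--         n_str = "'"
--     else:
--         n_str = str(n)
--     return t + n_str
-- ===== SOURCE B (Python) =====
-- # B: table of disjoint cycles per axis + closed-form index/parity arithmetic
-- # instead of A's per-axis unrolled step loops.
--
-- _AXIS_CYCLES = {
--     "x": (("UFDB", (), 0), ("SE", (1,), 8), ("yz", (1,), 4)),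
--     "y": (("FRBL", (), 0), ("MS", (1,), 8), ("xz", (0,), 4)),
--     "z": (("ULDR", (), 0), ("ME", (1,), 8), ("xy", (1,), 4)),
-- }
--
-- def _rotate_turn(axis_turn, turn):
--     assert len(axis_turn) <= 2
--     axis = axis_turn[0]
--     axis_n = 1 if len(axis_turn) == 1 else 3 if axis_turn[1] == "'" else int(axis_turn[1])
--
--     t = turn[0]
--     if len(turn) == 1:
--         n = 1
--     elif turn[1] == "'":
--         n = 7 if t in "MSE" else 3
--     else:
--         n = int(turn[1])
--
--     assert axis in _AXIS_CYCLES
--     for cyc, flips, base in _AXIS_CYCLES[axis]: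
--         i = cyc.find(t)
--         if i >= 0:
--             L = len(cyc)
--             # crossings of sign-flipping edges in axis_n steps, closed form
--             crossings = sum((axis_n - (f - i) % L + L - 1) // L for f in flips)
--             t = cyc[(i + axis_n) % L]
--             if crossings % 2 == 1:
--                 n = base - n
--             break
--
--     assert n != 0
--     if n == 1:
--         n_str = ""
--     elif t in "ESM" and n == 7:
--         n_str = "'"
--     elif t not in "ESM" and n == 3:
--         n_str = "'"
--     else:
--         n_str = str(n)
--     return t + n_str
-- ===== Notes on version B (the rewrite author's own statement) =====
-- stated objective: simpler
-- what changed: Replaced A's three unrolled per-axis if/elif step loops (iterated axis_n times) by one per-axis table of disjoint letter cycles: the destination letter comes from a single closed-form modular index advance and the sign flip from a closed-form count of flip-edge crossings, with parsing and serialization unchanged.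
import Mathlib
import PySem

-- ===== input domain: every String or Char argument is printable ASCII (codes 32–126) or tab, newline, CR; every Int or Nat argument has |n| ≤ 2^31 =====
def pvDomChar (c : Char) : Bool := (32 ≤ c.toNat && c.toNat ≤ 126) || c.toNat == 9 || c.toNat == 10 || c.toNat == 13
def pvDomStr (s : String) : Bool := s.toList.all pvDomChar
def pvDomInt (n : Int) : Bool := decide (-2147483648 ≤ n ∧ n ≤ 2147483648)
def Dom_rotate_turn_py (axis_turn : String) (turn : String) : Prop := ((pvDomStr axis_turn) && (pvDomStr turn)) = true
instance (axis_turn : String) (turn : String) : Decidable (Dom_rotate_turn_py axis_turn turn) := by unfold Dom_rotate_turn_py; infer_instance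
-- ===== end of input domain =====

-- B replaces A's three unrolled per-axis step loops by a per-axis cycle table with
-- closed-form modular index/parity arithmetic (objective: simpler).

-- ===== PORT A =====
-- int(c) for a single character; ValueError (non-digit) is excluded by Pre_
def digitIntA (c : Char) : Int := (PySem.Int.ofChars? [c]).getD 0

-- axis_n = 1 if len(axis_turn) == 1 else 3 if axis_turn[1] == "'" else int(axis_turn[1])
def axisNA (aL : List Char) : Int :=
  if aL.length = 1 then 1
  else if aL[1]? = some '\'' then 3
  else digitIntA (aL.getD 1 ' ')

-- the n-parsing if/elif chain of A (t in "MSE" is single-char membership)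
def turnNA (t : Char) (tL : List Char) : Int :=
  if tL.length = 1 then 1
  else if tL[1]? = some '\'' ∧ t ∈ (['M','S','E'] : List Char) then 7
  else if tL[1]? = some '\'' then 3
  else digitIntA (tL.getD 1 ' ')

-- for i in range(axis_n): the x-axis if/elif chain ('else: break' is the final arm)
def loopAx : Nat → Char → Int → Char × Int
  | 0, t, n => (t, n)
  | k+1, t, n =>
    if t = 'U' then loopAx k 'F' n
    else if t = 'F' then loopAx k 'D' n
    else if t = 'D' then loopAx k 'B' n
    else if t = 'B' then loopAx k 'U' n
    else if t = 'S' then loopAx k 'E' n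
    else if t = 'E' then loopAx k 'S' (8 - n)
    else if t = 'y' then loopAx k 'z' n
    else if t = 'z' then loopAx k 'y' (4 - n)
    else (t, n)

def loopAy : Nat → Char → Int → Char × Int
  | 0, t, n => (t, n)
  | k+1, t, n =>
    if t = 'F' then loopAy k 'R' n
    else if t = 'R' then loopAy k 'B' n
    else if t = 'B' then loopAy k 'L' n
    else if t = 'L' then loopAy k 'F' n
    else if t = 'M' then loopAy k 'S' n
    else if t = 'S' then loopAy k 'M' (8 - n)
    else if t = 'x' then loopAy k 'z' (4 - n)
    else if t = 'z' then loopAy k 'x' n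
    else (t, n)

def loopAz : Nat → Char → Int → Char × Int
  | 0, t, n => (t, n)
  | k+1, t, n =>
    if t = 'U' then loopAz k 'L' n
    else if t = 'L' then loopAz k 'D' n
    else if t = 'D' then loopAz k 'R' n
    else if t = 'R' then loopAz k 'U' n
    else if t = 'M' then loopAz k 'E' n
    else if t = 'E' then loopAz k 'M' (8 - n)
    else if t = 'x' then loopAz k 'y' n
    else if t = 'y' then loopAz k 'x' (4 - n)
    else (t, n)

-- axis dispatch; 'else: assert False' (non-xyz axis) is excluded by Pre_
def coreA (a : Char) (k : Nat) (t : Char) (n : Int) : Char × Int :=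
  if a = 'x' then loopAx k t n
  else if a = 'y' then loopAy k t n
  else if a = 'z' then loopAz k t n
  else (t, n)

-- the final (t, n) -> string conversion ('assert n != 0' is excluded by Pre_)
def serA (r : Char × Int) : String :=
  if r.2 = 1 then String.ofList [r.1]
  else if r.1 ∈ (['E','S','M'] : List Char) ∧ r.2 = 7 then String.ofList [r.1, '\'']
  else if r.1 ∉ (['E','S','M'] : List Char) ∧ r.2 = 3 then String.ofList [r.1, '\'']
  else String.ofList (r.1 :: (PySem.Int.toStr r.2).toList)

-- turn[0] on an empty turn raises IndexError, excluded by Pre_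
def rotate_turn_py (axis_turn : String) (turn : String) : String :=
  serA (coreA (axis_turn.toList.headD ' ') (axisNA axis_turn.toList).toNat
    (turn.toList.headD ' ') (turnNA (turn.toList.headD ' ') turn.toList))

-- ===== PORT B =====
def digitIntB (c : Char) : Int := (PySem.Int.ofChars? [c]).getD 0

def axisNB (aL : List Char) : Int :=
  if aL.length = 1 then 1
  else if aL[1]? = some '\'' then 3
  else digitIntB (aL.getD 1 ' ')

def turnNB (t : Char) (tL : List Char) : Int :=
  if tL.length = 1 then 1
  else if tL[1]? = some '\'' then (if t ∈ (['M','S','E'] : List Char) then 7 else 3)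
  else digitIntB (tL.getD 1 ' ')

-- _AXIS_CYCLES[axis]: (cycle letters, flip edge indices, flip base); the
-- 'assert axis in _AXIS_CYCLES' (non-xyz axis) is excluded by Pre_
def bTable (a : Char) : List (List Char × List Nat × Int) :=
  if a = 'x' then [(['U','F','D','B'], [], 0), (['S','E'], [1], 8), (['y','z'], [1], 4)]
  else if a = 'y' then [(['F','R','B','L'], [], 0), (['M','S'], [1], 8), (['x','z'], [0], 4)]
  else [(['U','L','D','R'], [], 0), (['M','E'], [1], 8), (['x','y'], [1], 4)]

-- Source B's for-loop with 'cyc.find(t) >= 0 … break' = first cycle containing t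
def coreB (a : Char) (k : Nat) (t : Char) (n : Int) : Char × Int :=
  match (bTable a).find? (fun c => decide (t ∈ c.1)) with
  | none => (t, n)
  | some (cyc, flips, base) =>
    let i : Int := cyc.idxOf t
    let L : Int := cyc.length
    let crossings :=
      (flips.map (fun f => PySem.Int.floordiv ((k : Int) - PySem.Int.mod ((f : Int) - i) L + L - 1) L)).sum
    let t' := (PySem.List.pyGet? cyc (PySem.Int.mod (i + (k : Int)) L)).getD ' '
    (t', if PySem.Int.mod crossings 2 = 1 then base - n else n)

def serB (r : Char × Int) : String :=
  if r.2 = 1 then String.ofList [r.1]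
  else if r.1 ∈ (['E','S','M'] : List Char) ∧ r.2 = 7 then String.ofList [r.1, '\'']
  else if r.1 ∉ (['E','S','M'] : List Char) ∧ r.2 = 3 then String.ofList [r.1, '\'']
  else String.ofList (r.1 :: (PySem.Int.toStr r.2).toList)

def rotate_turn_py_alt (axis_turn : String) (turn : String) : String :=
  serB (coreB (axis_turn.toList.headD ' ') (axisNB axis_turn.toList).toNat
    (turn.toList.headD ' ') (turnNB (turn.toList.headD ' ') turn.toList))

-- ===== PRECONDITION & SPEC =====
def pvDigits : List Char := ['0','1','2','3','4','5','6','7','8','9']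
def pvDigitVal (c : Char) : Int := ((c.toNat - 48 : Nat) : Int)

-- pair-cycle letters whose turn count can be sign-flipped: (start parity, flip base)
def pvFlipInfo (a t : Char) : Option (Nat × Int) :=
  if a = 'x' then
    if t = 'S' then some (0, 8) else if t = 'E' then some (1, 8)
    else if t = 'y' then some (0, 4) else if t = 'z' then some (1, 4) else none
  else if a = 'y' then
    if t = 'M' then some (0, 8) else if t = 'S' then some (1, 8)
    else if t = 'z' then some (0, 4) else if t = 'x' then some (1, 4) else none
  else
    if t = 'M' then some (0, 8) else if t = 'E' then some (1, 8)
    else if t = 'x' then some (0, 4) else if t = 'y' then some (1, 4) else none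

-- Pre_ = exactly the inputs on which Python A returns normally: both strings are
-- well-formed (axis x/y/z with optional ' or digit suffix; turn letter with optional
-- ' or digit suffix), and the resulting turn count is nonzero (A asserts n != 0);
-- that count is the parsed n0 negated about the flip base iff the letter crosses a
-- sign-flipping edge an odd number of times — a parity read off the two characters.
def preBool (axis_turn : String) (turn : String) : Bool :=
  match axis_turn.toList, turn.toList with
  | a :: arest, t :: trest =>
    (a == 'x' || a == 'y' || a == 'z') &&
    (match arest with | [] => true | [b] => b == '\'' || pvDigits.contains b | _ => false) &&
    (match trest with | [] => true | c :: _ => c == '\'' || pvDigits.contains c) &&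
    (let k : Nat := match arest with
       | [b] => if b == '\'' then 3 else b.toNat - 48
       | _ => 1
     let n0 : Int := match trest with
       | [] => 1
       | c :: _ => if c == '\'' then (if t == 'M' || t == 'S' || t == 'E' then 7 else 3)
                   else pvDigitVal c
     match pvFlipInfo a t with
     | some (s, base) => if ((k + s) / 2) % 2 = 1 then n0 != base else n0 != 0
     | none => n0 != 0)
  | _, _ => false

def Pre_rotate_turn_py (axis_turn : String) (turn : String) : Prop :=
  preBool axis_turn turn = true
instance (axis_turn : String) (turn : String) : Decidable (Pre_rotate_turn_py axis_turn turn) := by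
  unfold Pre_rotate_turn_py; infer_instance

def pvWitness_rotate_turn_py : String × String := ("y", "R")

def Spec_rotate_turn_py (axis_turn : String) (turn : String) (out : String) : Prop := out = rotate_turn_py_alt axis_turn turn
instance (axis_turn : String) (turn : String) (out : String) : Decidable (Spec_rotate_turn_py axis_turn turn out) := by unfold Spec_rotate_turn_py; infer_instance

-- ===== CLAIM (what is proved, stated in full; the proofs are below) =====
def Claim_equal_rotate_turn_py : Prop := ∀ (axis_turn : String) (turn : String), Dom_rotate_turn_py axis_turn turn → Pre_rotate_turn_py axis_turn turn → Spec_rotate_turn_py axis_turn turn (rotate_turn_py axis_turn turn)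

-- ===== LEMMAS AND PROOFS =====
-- the affine transform id / (off ± n) accumulated by A's loop on the count n
def appT (f : Int × Bool) (n : Int) : Int := if f.2 then f.1 - n else f.1 + n
def flipT (b : Int) (s : Char × Int × Bool) : Char × Int × Bool :=
  (s.1, if s.2.2 then s.2.1 - b else s.2.1 + b, !s.2.2)

-- symbolic (n-free) versions of A's three loops
def symAx : Nat → Char → Char × Int × Bool
  | 0, t => (t, 0, false)
  | k+1, t =>
    if t = 'U' then symAx k 'F'
    else if t = 'F' then symAx k 'D'
    else if t = 'D' then symAx k 'B'
    else if t = 'B' then symAx k 'U'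
    else if t = 'S' then symAx k 'E'
    else if t = 'E' then flipT 8 (symAx k 'S')
    else if t = 'y' then symAx k 'z'
    else if t = 'z' then flipT 4 (symAx k 'y')
    else (t, 0, false)

def symAy : Nat → Char → Char × Int × Bool
  | 0, t => (t, 0, false)
  | k+1, t =>
    if t = 'F' then symAy k 'R'
    else if t = 'R' then symAy k 'B'
    else if t = 'B' then symAy k 'L'
    else if t = 'L' then symAy k 'F'
    else if t = 'M' then symAy k 'S'
    else if t = 'S' then flipT 8 (symAy k 'M')
    else if t = 'x' then flipT 4 (symAy k 'z')
    else if t = 'z' then symAy k 'x'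
    else (t, 0, false)

def symAz : Nat → Char → Char × Int × Bool
  | 0, t => (t, 0, false)
  | k+1, t =>
    if t = 'U' then symAz k 'L'
    else if t = 'L' then symAz k 'D'
    else if t = 'D' then symAz k 'R'
    else if t = 'R' then symAz k 'U'
    else if t = 'M' then symAz k 'E'
    else if t = 'E' then flipT 8 (symAz k 'M')
    else if t = 'x' then symAz k 'y'
    else if t = 'y' then flipT 4 (symAz k 'x')
    else (t, 0, false)

theorem loopAx_factor (k : Nat) (t : Char) (n : Int) :
    loopAx k t n = ((symAx k t).1, appT (symAx k t).2 n) := by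
  induction k generalizing t n with
  | zero => simp [loopAx, symAx, appT]
  | succ k ih =>
    simp only [loopAx, symAx]
    split_ifs <;> (try rw [ih]) <;>
      simp [appT, flipT, Prod.ext_iff] <;> split_ifs <;> simp_all <;> omega

theorem loopAy_factor (k : Nat) (t : Char) (n : Int) :
    loopAy k t n = ((symAy k t).1, appT (symAy k t).2 n) := by
  induction k generalizing t n with
  | zero => simp [loopAy, symAy, appT]
  | succ k ih =>
    simp only [loopAy, symAy]
    split_ifs <;> (try rw [ih]) <;>
      simp [appT, flipT, Prod.ext_iff] <;> split_ifs <;> simp_all <;> omega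

theorem loopAz_factor (k : Nat) (t : Char) (n : Int) :
    loopAz k t n = ((symAz k t).1, appT (symAz k t).2 n) := by
  induction k generalizing t n with
  | zero => simp [loopAz, symAz, appT]
  | succ k ih =>
    simp only [loopAz, symAz]
    split_ifs <;> (try rw [ih]) <;>
      simp [appT, flipT, Prod.ext_iff] <;> split_ifs <;> simp_all <;> omega

-- symbolic (n-free) version of B's table computation
def symB (a : Char) (k : Nat) (t : Char) : Char × Int × Bool :=
  match (bTable a).find? (fun c => decide (t ∈ c.1)) with
  | none => (t, 0, false)
  | some (cyc, flips, base) =>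
    let i : Int := cyc.idxOf t
    let L : Int := cyc.length
    let crossings :=
      (flips.map (fun f => PySem.Int.floordiv ((k : Int) - PySem.Int.mod ((f : Int) - i) L + L - 1) L)).sum
    let t' := (PySem.List.pyGet? cyc (PySem.Int.mod (i + (k : Int)) L)).getD ' '
    if PySem.Int.mod crossings 2 = 1 then (t', base, true) else (t', 0, false)

theorem coreB_factor (a : Char) (k : Nat) (t : Char) (n : Int) :
    coreB a k t n = ((symB a k t).1, appT (symB a k t).2 n) := by
  unfold coreB symB
  cases h : (bTable a).find? (fun c => decide (t ∈ c.1)) with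
  | none => simp [appT]
  | some s =>
    rcases s with ⟨cyc, flips, base⟩
    simp only []
    split_ifs <;> simp [appT]

def pvLetters : List Char := ['U','F','D','B','R','L','M','S','E','x','y','z']

theorem sym_eq_x (k : Nat) (hk : k < 10) (t : Char) (ht : t ∈ pvLetters) :
    symAx k t = symB 'x' k t := by
  interval_cases k <;> fin_cases ht <;> decide
theorem sym_eq_y (k : Nat) (hk : k < 10) (t : Char) (ht : t ∈ pvLetters) :
    symAy k t = symB 'y' k t := by
  interval_cases k <;> fin_cases ht <;> decide
theorem sym_eq_z (k : Nat) (hk : k < 10) (t : Char) (ht : t ∈ pvLetters) :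
    symAz k t = symB 'z' k t := by
  interval_cases k <;> fin_cases ht <;> decide

theorem symAx_other (k : Nat) (t : Char) (h : t ∉ pvLetters) : symAx k t = (t, 0, false) := by
  simp only [pvLetters, List.mem_cons, List.not_mem_nil, or_false, not_or] at h
  obtain ⟨hU, hF, hD, hB, hR, hL, hM, hS, hE, hx, hy, hz⟩ := h
  cases k with
  | zero => rfl
  | succ k => simp [symAx, hU, hF, hD, hB, hS, hE, hy, hz]

theorem symAy_other (k : Nat) (t : Char) (h : t ∉ pvLetters) : symAy k t = (t, 0, false) := by
  simp only [pvLetters, List.mem_cons, List.not_mem_nil, or_false, not_or] at h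
  obtain ⟨hU, hF, hD, hB, hR, hL, hM, hS, hE, hx, hy, hz⟩ := h
  cases k with
  | zero => rfl
  | succ k => simp [symAy, hF, hR, hB, hL, hM, hS, hx, hz]

theorem symAz_other (k : Nat) (t : Char) (h : t ∉ pvLetters) : symAz k t = (t, 0, false) := by
  simp only [pvLetters, List.mem_cons, List.not_mem_nil, or_false, not_or] at h
  obtain ⟨hU, hF, hD, hB, hR, hL, hM, hS, hE, hx, hy, hz⟩ := h
  cases k with
  | zero => rfl
  | succ k => simp [symAz, hU, hL, hD, hR, hM, hE, hx, hy]

theorem symB_other (a : Char) (k : Nat) (t : Char) (h : t ∉ pvLetters) :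
    symB a k t = (t, 0, false) := by
  simp only [pvLetters, List.mem_cons, List.not_mem_nil, or_false, not_or] at h
  obtain ⟨hU, hF, hD, hB, hR, hL, hM, hS, hE, hx, hy, hz⟩ := h
  unfold symB bTable
  split_ifs <;> simp [List.find?, hU, hF, hD, hB, hR, hL, hM, hS, hE, hx, hy, hz]

theorem core_eq (a : Char) (ha : a = 'x' ∨ a = 'y' ∨ a = 'z') (k : Nat) (hk : k < 10)
    (t : Char) (n : Int) : coreA a k t n = coreB a k t n := by
  rw [coreB_factor]
  by_cases ht : t ∈ pvLetters
  · rcases ha with h | h | h <;> subst h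
    · rw [show coreA 'x' k t n = loopAx k t n from by simp [coreA],
        loopAx_factor, sym_eq_x k hk t ht]
    · rw [show coreA 'y' k t n = loopAy k t n from by simp [coreA],
        loopAy_factor, sym_eq_y k hk t ht]
    · rw [show coreA 'z' k t n = loopAz k t n from by simp [coreA],
        loopAz_factor, sym_eq_z k hk t ht]
  · rw [symB_other a k t ht]
    rcases ha with h | h | h <;> subst h
    · rw [show coreA 'x' k t n = loopAx k t n from by simp [coreA],
        loopAx_factor, symAx_other k t ht]
    · rw [show coreA 'y' k t n = loopAy k t n from by simp [coreA],
        loopAy_factor, symAy_other k t ht]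
    · rw [show coreA 'z' k t n = loopAz k t n from by simp [coreA],
        loopAz_factor, symAz_other k t ht]

theorem ser_eq : serB = serA := rfl
theorem axisN_eq : axisNB = axisNA := rfl

theorem turnN_eq (t : Char) (tL : List Char) : turnNB t tL = turnNA t tL := by
  unfold turnNA turnNB digitIntA digitIntB
  split_ifs <;> simp_all

theorem digit_lt (c : Char) (h : c ∈ pvDigits) : (digitIntA c).toNat < 10 := by
  fin_cases h <;> decide

theorem digit_ne_quote (c : Char) (h : c ∈ pvDigits) : c ≠ '\'' := by
  fin_cases h <;> decide

theorem axisN_lt (a b : Char) (hb : b = '\'' ∨ b ∈ pvDigits) :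
    (axisNA [a, b]).toNat < 10 := by
  rcases hb with h | h
  · subst h; simp [axisNA]
  · have h1 := digit_lt b h
    have h2 := digit_ne_quote b h
    simpa [axisNA, h2] using h1

-- ===== VERDICT (by name: the statement is the Claim_ definition above) =====
theorem rotate_turn_py_spec : Claim_equal_rotate_turn_py := by
  intro axis_turn turn _hDom hPre
  unfold Spec_rotate_turn_py
  unfold Pre_rotate_turn_py at hPre
  rw [preBool.eq_def] at hPre
  cases haL : axis_turn.toList with
  | nil => rw [haL] at hPre; simp at hPre
  | cons a arest =>
    cases htL : turn.toList with
    | nil => rw [haL, htL] at hPre; simp at hPre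
    | cons t trest =>
      rw [haL, htL] at hPre
      rw [Bool.and_eq_true] at hPre
      obtain ⟨h1, -⟩ := hPre
      rw [Bool.and_eq_true] at h1
      obtain ⟨h1, -⟩ := h1
      rw [Bool.and_eq_true] at h1
      obtain ⟨h1, h2⟩ := h1
      have ha : a = 'x' ∨ a = 'y' ∨ a = 'z' := by
        simpa [or_assoc] using h1
      unfold rotate_turn_py rotate_turn_py_alt
      rw [haL, htL, ser_eq, axisN_eq, turnN_eq]
      have hk : (axisNA (a :: arest)).toNat < 10 := by
        cases arest with
        | nil => simp [axisNA]
        | cons b rest =>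
          cases rest with
          | nil =>
            apply axisN_lt
            simpa using h2
          | cons _ _ => simp at h2
      simp only [List.headD_cons]
      rw [core_eq a ha _ hk]
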